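-- pv_equiv track=rewrite | github.com/lichess-org/lila | bin/dependency-graph.py | pick_essential_dependencies
-- ===== SOURCE A (Python) =====
-- def pick_essential_dependencies(providers_dict):
--
--     def pick(essentials, providers_dict):
--         if len(providers_dict) == 0:
--             return essentials, providers_dict
--
--         candidate = min(providers_dict.values(), key=len)
--         if len(candidate) > 1:
--             return essentials, providers_dict
--
--         new = candidate[0]
--         essentials.append(new)
--
--         leftovers = {
--             dependency: providers
--             for dependency, providers in providers_dict.items()
--             if new not in providers
--         }
--
--         return pick(essentials, leftovers)
--
--     return pick([], providers_dict)
-- ===== SOURCE B (Python) =====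
-- def pick_essential_dependencies(providers_dict):
--     essentials = []
--     current = providers_dict
--     while True:
--         new = next((provs[0] for provs in current.values() if len(provs) == 1), None)
--         if new is None:
--             return essentials, current
--         essentials.append(new)
--         current = {dep: provs for dep, provs in current.items() if new not in provs}
-- ===== Notes on version B (the rewrite author's own statement) =====
-- stated objective: simpler
-- what changed: Instead of computing min(values, key=len) and testing its length each round, B scans for the first singleton provider list (next(...) with a generator) and loops until none exists; when every provider list has length >= 1 the min-by-length candidate is a singleton exactly when one exists, and min's tie-breaking equals first-match.
import Mathlib
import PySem

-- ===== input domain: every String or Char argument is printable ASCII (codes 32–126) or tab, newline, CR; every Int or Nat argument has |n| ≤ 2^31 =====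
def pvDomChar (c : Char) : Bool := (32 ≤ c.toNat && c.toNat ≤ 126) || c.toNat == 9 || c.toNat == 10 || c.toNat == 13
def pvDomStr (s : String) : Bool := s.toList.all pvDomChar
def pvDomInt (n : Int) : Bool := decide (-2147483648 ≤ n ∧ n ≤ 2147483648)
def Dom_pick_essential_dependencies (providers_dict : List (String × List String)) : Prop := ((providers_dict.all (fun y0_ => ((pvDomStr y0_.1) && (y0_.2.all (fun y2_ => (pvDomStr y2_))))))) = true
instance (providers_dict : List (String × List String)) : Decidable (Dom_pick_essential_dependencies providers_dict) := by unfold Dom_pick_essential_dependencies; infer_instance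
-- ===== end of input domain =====

-- B replaces A's min-by-length recursion with a scan for the first SINGLETON provider list
-- (when every provider list has length ≥ 1, the min-by-length candidate is a singleton exactly when
-- one exists, and min's tie-breaking equals first-match);
-- objective: simpler.

-- ===== PORT A =====
-- termination helper for A: the filter drops the entry whose provider list is the picked singleton,
-- so the leftovers are strictly shorter
theorem pvStepShorter (cur : List (String × List String))
    (hnil : ¬ cur = [])
    (hne : ¬ ((PySem.List.min? (cur.map Prod.snd) (fun v => v.length)).getD []) = []) :
    (cur.filter fun p =>
        !(p.2.contains (((PySem.List.min? (cur.map Prod.snd) (fun v => v.length)).getD []).headD ""))).length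
      < cur.length := by
  rcases h : PySem.List.min? (cur.map Prod.snd) (fun v => v.length) with _ | m
  · exact absurd (by simpa using (PySem.List.min?_eq_none_iff (xs := cur.map Prod.snd) (key := fun v => v.length)).mp h) hnil
  · rcases m with _ | ⟨new, t⟩
    · rw [h] at hne; simp at hne
    · simp only [Option.getD_some, List.headD_cons]
      have hm := PySem.List.min?_mem h
      rcases List.mem_map.mp hm with ⟨p, hp, hsnd⟩
      have hfalse : (!(p.2.contains new)) = false := by
        simp [hsnd, List.contains_eq_mem]
      clear h hm hsnd hne
      induction cur with
      | nil => cases hp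
      | cons a l ihl =>
        rcases List.mem_cons.mp hp with rfl | hmem
        · have := l.length_filter_le
            (fun p => !(p.2.contains new))
          simp only [List.filter_cons, hfalse, Bool.false_eq_true, if_false, List.length_cons]
          omega
        · have hlt := ihl (List.ne_nil_of_mem hmem) hmem
          by_cases ha : (!(a.2.contains new)) = true
          · simp only [List.filter_cons, ha, if_true, List.length_cons]
            omega
          · simp only [List.filter_cons, ha, Bool.false_eq_true, if_false, List.length_cons]
            omega

-- termination helper for A: the well-founded compilation rewrites the recursive call over `cur.attach`;
-- this transfers the length bound back
theorem pvAttachLt {α : Type} (l : List α) (p : α → Bool)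
    (h : (l.filter p).length < l.length) :
    ((l.attach.filter fun x => p x.1).unattach).length < l.length := by
  simp only [List.filter_attach, List.unattach, List.map_map, List.length_map, List.length_attach]
  exact h

-- inner helper `pick(essentials, providers_dict)` of A
def pickA (essentials : List String) (cur : List (String × List String)) :
    List String × (List (String × List String)) :=
  if cur.length = 0 then (essentials, cur)
  else
    let candidate := (PySem.List.min? (cur.map Prod.snd) (fun v => v.length)).getD []
    if candidate.length > 1 then (essentials, cur)
    else if candidate.isEmpty then (essentials, cur)  -- Python raises IndexError here (excluded by Pre_)
    else
      let new := candidate.headD ""                   -- candidate[0]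
      pickA (essentials ++ [new]) (cur.filter fun p => !(p.2.contains new))
termination_by cur.length
decreasing_by
  rename_i h1 _ h3
  have h3' : ¬ ((PySem.List.min? (cur.attach.map (fun x : {p : String × List String // p ∈ cur} => x.1.2)) (fun v : List String => v.length)).getD []).isEmpty = true := h3
  simp only [List.map_attach_eq_pmap, List.pmap_eq_map] at h3' ⊢
  exact pvAttachLt cur _ (pvStepShorter cur (by simpa [List.length_eq_zero_iff] using h1) (by simpa using h3'))

def pick_essential_dependencies (providers_dict : List (String × List String)) :
    List String × (List (String × List String)) :=
  pickA [] providers_dict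

-- ===== PORT B =====
-- the `while True` loop of B: `next((provs[0] for provs in current.values() if len(provs)==1), None)`
-- is a first-match scan, ported as find?; no min, no key comparison
def loopB (acc : List String) (cur : List (String × List String)) :
    List String × (List (String × List String)) :=
  match hf : cur.find? (fun p => p.2.length == 1) with
  | none => (acc, cur)                                  -- `new is None`: return
  | some q =>
      let new := q.2.headD ""                           -- provs[0] of the first singleton
      loopB (acc ++ [new]) (cur.filter fun p => !(p.2.contains new))
termination_by cur.length
decreasing_by
  have hq := List.mem_of_find?_eq_some hf
  have hlen : q.2.length = 1 := by
    have hp := List.find?_some hf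
    simpa using hp
  have hx : ∃ x, q.2 = [x] := by
    cases h2 : q.2 with
    | nil => rw [h2] at hlen; simp at hlen
    | cons a l =>
      rw [h2] at hlen
      simp only [List.length_cons] at hlen
      have hl : l = [] := List.length_eq_zero_iff.mp (by omega)
      exact ⟨a, by rw [hl]⟩
  obtain ⟨x, hx⟩ := hx
  have hfilter : (cur.filter fun p => !(p.2.contains (q.2.headD ""))).length < cur.length :=
    List.length_filter_lt_length_iff_exists.mpr ⟨q, hq, by simp [hx]⟩
  exact pvAttachLt cur _ hfilter

def pick_essential_dependencies_alt (providers_dict : List (String × List String)) :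
    List String × (List (String × List String)) :=
  loopB [] providers_dict

-- ===== PRECONDITION & SPEC =====
-- Pre_ excludes dicts where some dependency has a length-0 provider list (Python A raises
-- IndexError there: min picks that list and candidate[0] fails)
-- and association lists with duplicate keys, which a Python dict cannot hold (the representation
-- is ambiguous: both Pythons see only the deduplicated dict).
def Pre_pick_essential_dependencies (providers_dict : List (String × List String)) : Prop :=
  (∀ p ∈ providers_dict, p.2 ≠ []) ∧ (providers_dict.map Prod.fst).Nodup
instance (providers_dict : List (String × List String)) : Decidable (Pre_pick_essential_dependencies providers_dict) := by unfold Pre_pick_essential_dependencies; infer_instance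

def pvWitness_pick_essential_dependencies : (List (String × List String)) :=
  [("a", ["x"]), ("b", ["x", "y"]), ("c", ["z", "w"])]

def Spec_pick_essential_dependencies (providers_dict : List (String × List String)) (out : List String × (List (String × List String))) : Prop := out = pick_essential_dependencies_alt providers_dict
instance (providers_dict : List (String × List String)) (out : List String × (List (String × List String))) : Decidable (Spec_pick_essential_dependencies providers_dict out) := by unfold Spec_pick_essential_dependencies; infer_instance

-- ===== CLAIM =====
def Claim_equal_pick_essential_dependencies : Prop := ∀ (providers_dict : List (String × List String)), Dom_pick_essential_dependencies providers_dict → Pre_pick_essential_dependencies providers_dict → Spec_pick_essential_dependencies providers_dict (pick_essential_dependencies providers_dict)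

-- ===== LEMMAS AND PROOFS =====

-- abbreviation for min?'s fold step on lists of strings, used only in the proofs
def pvStep (acc : Option (List String)) (x : List String) : Option (List String) :=
  match acc with
  | none => some x
  | some m => if x.length < m.length then some x else some m

theorem pvMin_eq_fold (xs : List (List String)) :
    PySem.List.min? xs (fun v => v.length) = xs.foldl pvStep none := by
  unfold PySem.List.min?
  congr 1
  funext acc x
  cases acc <;> rfl

theorem pvFold_fix (t : List (List String)) (m : List String)
    (hne : ∀ y ∈ t, y ≠ []) (hm : m.length = 1) :
    t.foldl pvStep (some m) = some m := by
  induction t with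
  | nil => rfl
  | cons y t ih =>
    have hy : y ≠ [] := hne y (by simp)
    have hlt : ¬ y.length < m.length := by
      have : 1 ≤ y.length := by
        cases y with
        | nil => exact absurd rfl hy
        | cons a l => simp
      omega
    simp only [List.foldl_cons, pvStep, hlt, if_false]
    exact ih (fun y hy => hne y (by simp [hy]))

theorem pvFold_find (t : List (List String)) (m v : List String)
    (hne : ∀ y ∈ t, y ≠ []) (hm : 1 < m.length)
    (hf : t.find? (fun v => v.length == 1) = some v) :
    t.foldl pvStep (some m) = some v := by
  induction t generalizing m with
  | nil => simp at hf
  | cons y t ih =>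
    have hne' : ∀ z ∈ t, z ≠ [] := fun z hz => hne z (by simp [hz])
    by_cases hy1 : ((fun v : List String => v.length == 1) y) = true
    · have hv : v = y := by
        rw [List.find?_cons_of_pos (p := fun v : List String => v.length == 1) hy1] at hf
        exact (Option.some_inj.mp hf).symm
      subst hv
      have hlt : v.length < m.length := by
        have : v.length = 1 := by simpa using hy1
        omega
      simp only [List.foldl_cons, pvStep, hlt, if_true]
      exact pvFold_fix t v hne' (by simpa using hy1)
    · rw [List.find?_cons_of_neg (p := fun v : List String => v.length == 1) hy1] at hf
      have hy : y ≠ [] := hne y (by simp)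
      have hylen : 1 < y.length := by
        have h1 : y.length ≠ 1 := by simpa using hy1
        have : 1 ≤ y.length := by
          cases y with
          | nil => exact absurd rfl hy
          | cons a l => simp
        omega
      simp only [List.foldl_cons, pvStep]
      by_cases hlt : y.length < m.length
      · simp only [hlt, if_true]
        exact ih y hne' hylen hf
      · simp only [hlt, if_false]
        exact ih m hne' hm hf

-- if a singleton exists, min-by-length returns the FIRST singleton
theorem pvMin_eq_first_singleton (xs : List (List String)) (v : List String)
    (hne : ∀ y ∈ xs, y ≠ [])
    (hf : xs.find? (fun v => v.length == 1) = some v) :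
    PySem.List.min? xs (fun v => v.length) = some v := by
  cases xs with
  | nil => simp at hf
  | cons a t =>
    have ha : a ≠ [] := hne a (by simp)
    have hne' : ∀ z ∈ t, z ≠ [] := fun z hz => hne z (by simp [hz])
    by_cases ha1 : ((fun v : List String => v.length == 1) a) = true
    · have hv : v = a := by
        rw [List.find?_cons_of_pos (p := fun v : List String => v.length == 1) ha1] at hf
        exact (Option.some_inj.mp hf).symm
      subst hv
      rw [pvMin_eq_fold, List.foldl_cons]
      exact pvFold_fix t v hne' (by simpa using ha1)
    · rw [List.find?_cons_of_neg (p := fun v : List String => v.length == 1) ha1] at hf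
      have halen : 1 < a.length := by
        have h1 : a.length ≠ 1 := by simpa using ha1
        have : 1 ≤ a.length := by
          cases a with
          | nil => exact absurd rfl ha
          | cons x l => simp
        omega
      rw [pvMin_eq_fold, List.foldl_cons]
      exact pvFold_find t a v hne' halen hf

-- unfolding equations for loopB (its equation lemma carries a dependent match)
theorem loopB_none (acc : List String) (cur : List (String × List String))
    (h : cur.find? (fun p => p.2.length == 1) = none) :
    loopB acc cur = (acc, cur) := by
  rw [loopB]
  split
  · rfl
  · rename_i q hq
    rw [h] at hq
    cases hq

theorem loopB_some (acc : List String) (cur : List (String × List String))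
    (q : String × List String)
    (h : cur.find? (fun p => p.2.length == 1) = some q) :
    loopB acc cur =
      loopB (acc ++ [q.2.headD ""]) (cur.filter fun p => !(p.2.contains (q.2.headD ""))) := by
  rw [loopB]
  split
  · rename_i hq
    rw [h] at hq
    cases hq
  · rename_i q' hq
    rw [h] at hq
    injection hq with hq
    subst hq
    rfl

theorem pickA_eq_loopB : ∀ (n : Nat) (cur : List (String × List String)),
    cur.length ≤ n → (∀ p ∈ cur, p.2 ≠ []) → ∀ (acc : List String),
    pickA acc cur = loopB acc cur := by
  intro n
  induction n with
  | zero =>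
    intro cur hle _ acc
    have hnil : cur = [] := List.eq_nil_of_length_eq_zero (Nat.le_zero.mp hle)
    subst hnil
    rw [pickA, loopB_none _ _ (by rfl)]
    simp
  | succ n ih =>
    intro cur hle hne acc
    by_cases hnil : cur = []
    · subst hnil
      rw [pickA, loopB_none _ _ (by rfl)]
      simp
    · have hlen : ¬ cur.length = 0 := by simpa [List.length_eq_zero_iff] using hnil
      rcases hf : cur.find? (fun p => p.2.length == 1) with _ | q
      · -- no singleton: every value has length ≥ 2, so A stops at the `> 1` branch
        rw [loopB_none _ _ hf, pickA]
        rcases hmin : PySem.List.min? (cur.map Prod.snd) (fun v => v.length) with _ | m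
        · exact absurd (by simpa using (PySem.List.min?_eq_none_iff (xs := cur.map Prod.snd) (key := fun v => v.length)).mp hmin) hnil
        · have hmem := PySem.List.min?_mem hmin
          rcases List.mem_map.mp hmem with ⟨p, hp, hsnd⟩
          have hall := List.find?_eq_none.mp hf
          have hne1 : p.2.length ≠ 1 := by simpa using hall p hp
          have hge : 1 ≤ p.2.length := by
            have hpe := hne p hp
            cases h2 : p.2 with
            | nil => exact absurd h2 hpe
            | cons a l => simp
          have hgt : 1 < m.length := by rw [← hsnd]; omega
          simp [hlen, hgt]
      · -- first singleton q: A's min candidate IS q.2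
        have hq := List.mem_of_find?_eq_some hf
        have hq1 : q.2.length = 1 := by
          have hp := List.find?_some hf
          simpa using hp
        obtain ⟨x, hx⟩ : ∃ x, q.2 = [x] := by
          cases h2 : q.2 with
          | nil => rw [h2] at hq1; simp at hq1
          | cons a l =>
            rw [h2] at hq1
            simp only [List.length_cons] at hq1
            have hl : l = [] := List.length_eq_zero_iff.mp (by omega)
            exact ⟨a, by rw [hl]⟩
        have hfv : (cur.map Prod.snd).find? (fun v => v.length == 1) = some q.2 := by
          rw [List.find?_map]
          have hcomp : ((fun v : List String => v.length == 1) ∘ Prod.snd) = (fun p : String × List String => p.2.length == 1) := rfl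
          rw [hcomp, hf]
          rfl
        have hmin := pvMin_eq_first_singleton (cur.map Prod.snd) q.2
          (by intro y hy; rcases List.mem_map.mp hy with ⟨p, hp, rfl⟩; exact hne p hp) hfv
        rw [loopB_some _ _ q hf, pickA]
        have hshort : (cur.filter fun p => !(p.2.contains (q.2.headD ""))).length < cur.length :=
          List.length_filter_lt_length_iff_exists.mpr ⟨q, hq, by simp [hx]⟩
        have hrec := ih (cur.filter fun p => !(p.2.contains (q.2.headD ""))) (by omega)
          (fun p hp => hne p (List.mem_of_mem_filter hp)) (acc ++ [q.2.headD ""])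
        simp [hlen, hmin, hx]
        simpa [hx] using hrec

-- ===== VERDICT =====
theorem pick_essential_dependencies_spec : Claim_equal_pick_essential_dependencies := by
  intro providers_dict _ hpre
  unfold Spec_pick_essential_dependencies pick_essential_dependencies pick_essential_dependencies_alt
  exact pickA_eq_loopB providers_dict.length providers_dict (le_refl _) hpre.1 []
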